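-- pv_equiv track=rewrite | github.com/aalto-ui/chi21adaptive | menu_adapt/pump.py | simplify_menu
-- ===== SOURCE A (Python) =====
-- def simplify_menu(menu):
--     separator = "----"
--     simplified_menu = []
--     for i in range (0,len(menu)):
--         if menu[i] != separator:
--             simplified_menu.append(menu[i])
--             continue
--         if menu[i] == separator and len(simplified_menu)>0:
--             if simplified_menu[-1] == separator: continue
--             simplified_menu.append(menu[i])
--     if simplified_menu[0] == separator:
--             del simplified_menu[0]
--     if simplified_menu[-1] == separator:
--             del simplified_menu[-1]
--     num_additional_separators = len(menu) - len(simplified_menu)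
--     for _ in range(num_additional_separators): simplified_menu.append(separator)
--     return simplified_menu
-- ===== SOURCE B (Python) =====
-- def simplify_menu(menu):
--     separator = "----"
--     # Partition menu into maximal runs of consecutive non-separator items.
--     groups = []
--     current = []
--     for item in menu:
--         if item == separator:
--             if current:
--                 groups.append(current)
--                 current = []
--         else:
--             current.append(item)
--     if current:
--         groups.append(current)
--     # Join the groups with exactly one separator between consecutive groups.
--     if groups:
--         core = groups[0][:]
--         for g in groups[1:]:
--             core.append(separator)
--             core.extend(g)
--     else:
--         core = []
--     # Pad with separators back to the original length.
--     return core + [separator] * (len(menu) - len(core))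
-- ===== Notes on version B (the rewrite author's own statement) =====
-- stated objective: alternative
-- what changed: B partitions the menu into maximal runs of non-separator items and joins the runs with single separators, instead of A's flat index loop that consults the last element of the output built so far; peephole first/last deletions disappear.
import Mathlib
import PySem

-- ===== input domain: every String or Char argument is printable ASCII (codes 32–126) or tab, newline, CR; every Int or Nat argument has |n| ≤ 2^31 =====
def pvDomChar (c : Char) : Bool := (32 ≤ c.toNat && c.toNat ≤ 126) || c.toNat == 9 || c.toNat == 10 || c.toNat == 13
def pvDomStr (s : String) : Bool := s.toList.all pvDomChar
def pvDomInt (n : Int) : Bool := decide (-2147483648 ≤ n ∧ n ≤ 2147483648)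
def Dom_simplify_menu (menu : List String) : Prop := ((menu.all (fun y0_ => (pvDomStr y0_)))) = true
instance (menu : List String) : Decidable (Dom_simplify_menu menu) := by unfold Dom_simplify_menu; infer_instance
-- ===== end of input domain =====

-- B re-implements A by partitioning the menu into maximal non-separator runs and joining
-- them with single separators (objective: alternative decomposition, same O(n) cost).

-- ===== PORT A =====
def pvSep : String := "----"

-- body of A's main loop, step for step
def pvStepA (sm : List String) (x : String) : List String :=
  if x ≠ pvSep then sm ++ [x]
  else if x = pvSep ∧ sm.length > 0 then
    (if PySem.List.pyGetD sm (-1) "" = pvSep then sm else sm ++ [x])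
  else sm

def simplify_menu (menu : List String) : List String :=
  let sm := (PySem.List.pyRange 0 (menu.length : Int) 1).foldl
    (fun acc i => pvStepA acc (PySem.List.pyGetD menu i "")) []
  let sm2 := if PySem.List.pyGetD sm 0 "" = pvSep then sm.drop 1 else sm
  let sm3 := if PySem.List.pyGetD sm2 (-1) "" = pvSep then sm2.dropLast else sm2
  sm3 ++ List.replicate (menu.length - sm3.length) pvSep

-- ===== PORT B =====
-- body of B's partitioning loop
def pvStepB (p : List (List String) × List String) (x : String) :
    List (List String) × List String :=
  if x = pvSep then (if p.2 ≠ [] then (p.1 ++ [p.2], ([] : List String)) else p)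
  else (p.1, p.2 ++ [x])

-- B's join loop: first group copied, the rest appended behind one separator each
def pvJoinCore : List (List String) → List String
  | [] => []
  | g :: rest => rest.foldl (fun c g' => c ++ [pvSep] ++ g') g

def simplify_menu_alt (menu : List String) : List String :=
  let p := menu.foldl pvStepB ([], [])
  let groups := if p.2 ≠ [] then p.1 ++ [p.2] else p.1
  let core := pvJoinCore groups
  core ++ List.replicate (menu.length - core.length) pvSep

-- ===== PRECONDITION & SPEC =====
-- Pre_ excludes exactly the menus with no non-separator item (incl. the empty menu):
-- there the Python A raises IndexError at simplified_menu[0].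
def Pre_simplify_menu (menu : List String) : Prop :=
  (menu.any (fun x => x ≠ pvSep)) = true
instance (menu : List String) : Decidable (Pre_simplify_menu menu) := by
  unfold Pre_simplify_menu; infer_instance
def pvWitness_simplify_menu : List String := ["File", "----", "Edit"]


def Spec_simplify_menu (menu : List String) (out : List String) : Prop :=
  out = simplify_menu_alt menu
instance (menu : List String) (out : List String) : Decidable (Spec_simplify_menu menu out) := by
  unfold Spec_simplify_menu; infer_instance

-- ===== CLAIM (what is proved, stated in full; the proofs are below) =====
def Claim_equal_simplify_menu : Prop := ∀ (menu : List String), Dom_simplify_menu menu →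
  Pre_simplify_menu menu → Spec_simplify_menu menu (simplify_menu menu)
-- ===== LEMMAS AND PROOFS =====

-- groups list seen by B at state (gs, cur)
def pvGroups (gs : List (List String)) (cur : List String) : List (List String) :=
  if cur ≠ [] then gs ++ [cur] else gs

-- A's accumulator at state (gs, cur) with pending-trailing-separator flag t
def pvRepr (gs : List (List String)) (cur : List String) (t : Bool) : List String :=
  pvJoinCore (pvGroups gs cur) ++ (if t then [pvSep] else [])

def pvInvP (gs : List (List String)) (cur : List String) (t : Bool) : Prop :=
  (∀ g ∈ gs, g ≠ [] ∧ pvSep ∉ g) ∧ pvSep ∉ cur ∧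
  (t = true → cur = [] ∧ gs ≠ []) ∧ (cur = [] → gs ≠ [] → t = true)

lemma pvJoin_append (gs : List (List String)) (g : List String) (h : gs ≠ []) :
    pvJoinCore (gs ++ [g]) = pvJoinCore gs ++ [pvSep] ++ g := by
  obtain ⟨g0, rest, rfl⟩ := List.exists_cons_of_ne_nil h
  simp [pvJoinCore, List.foldl_append]

lemma pvJoin_snoc (gs : List (List String)) (cur : List String) (x : String) :
    pvJoinCore (gs ++ [cur]) ++ [x] = pvJoinCore (gs ++ [cur ++ [x]]) := by
  cases gs with
  | nil => simp [pvJoinCore]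
  | cons g0 rest =>
    rw [pvJoin_append _ _ (by simp), pvJoin_append _ _ (by simp)]
    simp

lemma pvJoin_head (g0 : List String) (rest : List (List String)) :
    ∃ s, pvJoinCore (g0 :: rest) = g0 ++ s := by
  induction rest generalizing g0 with
  | nil => exact ⟨[], by simp [pvJoinCore]⟩
  | cons r rs ih =>
    obtain ⟨s, hs⟩ := ih (g0 ++ [pvSep] ++ r)
    refine ⟨[pvSep] ++ r ++ s, ?_⟩
    simp only [pvJoinCore, List.foldl_cons] at hs ⊢
    rw [hs]; simp

lemma pvStep_sim (gs : List (List String)) (cur : List String) (t : Bool)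
    (hinv : pvInvP gs cur t) (x : String) :
    ∃ t', pvInvP (pvStepB (gs, cur) x).1 (pvStepB (gs, cur) x).2 t' ∧
      pvStepA (pvRepr gs cur t) x = pvRepr (pvStepB (gs, cur) x).1 (pvStepB (gs, cur) x).2 t' := by
  obtain ⟨hgs, hcur, ht, ht'⟩ := hinv
  by_cases hx : x = pvSep
  · subst hx
    by_cases hc : cur = []
    · subst hc
      have hB : pvStepB (gs, ([] : List String)) pvSep = (gs, []) := by simp [pvStepB]
      rw [hB]
      refine ⟨t, ⟨hgs, hcur, ht, ht'⟩, ?_⟩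
      cases t with
      | false =>
        have hgsnil : gs = [] := by
          by_contra hne
          exact absurd (ht' rfl hne) (by simp)
        subst hgsnil
        simp [pvStepA, pvRepr, pvGroups, pvJoinCore]
      | true =>
        have hrepr : pvRepr gs [] true = pvJoinCore gs ++ [pvSep] := by simp [pvRepr, pvGroups]
        rw [hrepr]
        simp [pvStepA, PySem.List.pyGetD_neg_one_append_singleton]
    · obtain ⟨c', lc, hcc⟩ := (List.eq_nil_or_concat cur).resolve_left hc
      rw [List.concat_eq_append] at hcc; subst hcc
      have hlc : lc ≠ pvSep := fun h => hcur (by simp [h])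
      have hB : pvStepB (gs, c' ++ [lc]) pvSep = (gs ++ [c' ++ [lc]], []) := by
        simp [pvStepB]
      rw [hB]
      refine ⟨true, ⟨?_, by simp, fun _ => ⟨rfl, by simp⟩, fun _ _ => rfl⟩, ?_⟩
      · intro g hg
        rcases List.mem_append.mp hg with h | h
        · exact hgs g h
        · rw [List.mem_singleton] at h; subst h
          exact ⟨by simp, hcur⟩
      · have htf : t = false := by
          cases t with
          | false => rfl
          | true => exact absurd (ht rfl).1 hc
        subst htf
        have hrepr : pvRepr gs (c' ++ [lc]) false = pvJoinCore (gs ++ [c' ++ [lc]]) := by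
          simp [pvRepr, pvGroups]
        have hform : pvJoinCore (gs ++ [c' ++ [lc]]) = pvJoinCore (gs ++ [c']) ++ [lc] :=
          (pvJoin_snoc gs c' lc).symm
        rw [hrepr, hform]
        simp [pvStepA, PySem.List.pyGetD_neg_one_append_singleton, hlc, pvRepr, pvGroups, hform]
  · have hB : pvStepB (gs, cur) x = (gs, cur ++ [x]) := by simp [pvStepB, hx]
    rw [hB]
    refine ⟨false, ⟨hgs, ?_, by simp, by simp⟩, ?_⟩
    · intro h
      rcases List.mem_append.mp h with h | h
      · exact hcur h
      · rw [List.mem_singleton] at h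
        exact hx h.symm
    · cases t with
      | true =>
        obtain ⟨hc, hgne⟩ := ht rfl
        subst hc
        have hrepr : pvRepr gs [] true = pvJoinCore gs ++ [pvSep] := by simp [pvRepr, pvGroups]
        rw [hrepr]
        simp only [pvStepA]
        rw [if_pos (by exact hx : x ≠ pvSep)]
        have : pvRepr gs ([] ++ [x]) false = pvJoinCore (gs ++ [[x]]) := by
          simp [pvRepr, pvGroups]
        rw [this, pvJoin_append gs [x] hgne]
      | false =>
        by_cases hc : cur = []
        · subst hc
          have hgsnil : gs = [] := by
            by_contra hne
            exact absurd (ht' rfl hne) (by simp)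
          subst hgsnil
          simp [pvStepA, pvRepr, pvGroups, pvJoinCore, hx]
        · have hrepr : pvRepr gs cur false = pvJoinCore (gs ++ [cur]) := by
            simp [pvRepr, pvGroups, hc]
          rw [hrepr]
          simp only [pvStepA]
          rw [if_pos (by exact hx : x ≠ pvSep)]
          rw [pvJoin_snoc gs cur x]
          simp [pvRepr, pvGroups]

lemma pvFold_sim (rest : List String) :
    ∀ (gs : List (List String)) (cur : List String) (t : Bool), pvInvP gs cur t →
    ∃ t', pvInvP (rest.foldl pvStepB (gs, cur)).1 (rest.foldl pvStepB (gs, cur)).2 t' ∧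
      rest.foldl pvStepA (pvRepr gs cur t) =
        pvRepr (rest.foldl pvStepB (gs, cur)).1 (rest.foldl pvStepB (gs, cur)).2 t' := by
  induction rest with
  | nil => exact fun gs cur t h => ⟨t, h, rfl⟩
  | cons x xs ih =>
    intro gs cur t h
    obtain ⟨t1, h1, heq⟩ := pvStep_sim gs cur t h x
    obtain ⟨t', h', heq'⟩ := ih (pvStepB (gs, cur) x).1 (pvStepB (gs, cur) x).2 t1 h1
    refine ⟨t', by simpa using h', ?_⟩
    simp only [List.foldl_cons, heq]
    simpa using heq'

-- finalization: the first/last-element fix-ups of A recover exactly B's joined core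
lemma pvFinal (menu : List String) (gs : List (List String)) (cur : List String) (t : Bool)
    (hinv : pvInvP gs cur t)
    (hfoldB : menu.foldl pvStepB ([], []) = (gs, cur))
    (hfoldA : menu.foldl pvStepA [] = pvRepr gs cur t) :
    simplify_menu menu = simplify_menu_alt menu := by
  obtain ⟨hgs, hcur, ht, ht'⟩ := hinv
  have hB : simplify_menu_alt menu =
      pvJoinCore (pvGroups gs cur) ++
        List.replicate (menu.length - (pvJoinCore (pvGroups gs cur)).length) pvSep := by
    simp only [simplify_menu_alt, hfoldB]
    rfl
  have hA0 : simplify_menu menu =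
      (let sm := pvRepr gs cur t
       let sm2 := if PySem.List.pyGetD sm 0 "" = pvSep then sm.drop 1 else sm
       let sm3 := if PySem.List.pyGetD sm2 (-1) "" = pvSep then sm2.dropLast else sm2
       sm3 ++ List.replicate (menu.length - sm3.length) pvSep) := by
    simp only [simplify_menu]
    rw [PySem.List.foldl_pyRange_zero_pyGetD']
    rw [show menu.foldl (fun acc x => pvStepA acc x) [] = menu.foldl pvStepA [] from rfl, hfoldA]
  rw [hA0, hB]
  by_cases hgrp : pvGroups gs cur = []
  · have hc : cur = [] := by
      by_contra h
      simp [pvGroups, h] at hgrp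
    have hg : gs = [] := by simpa [pvGroups, hc] using hgrp
    have htf : t = false := by
      cases t with
      | false => rfl
      | true => exact absurd (ht rfl).2 (by simp [hg])
    subst hc; subst hg; subst htf
    simp [pvRepr, pvGroups, pvJoinCore, PySem.List.pyGetD, PySem.List.pyGet?, pvSep]
  · obtain ⟨g0, grest, hG⟩ := List.exists_cons_of_ne_nil hgrp
    have hg0 : g0 ≠ [] ∧ pvSep ∉ g0 := by
      have hmem : g0 ∈ pvGroups gs cur := by simp [hG]
      by_cases hc : cur = []
      · unfold pvGroups at hmem
        rw [if_neg (by simp [hc])] at hmem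
        exact hgs g0 hmem
      · unfold pvGroups at hmem
        rw [if_pos hc] at hmem
        rcases List.mem_append.mp hmem with h | h
        · exact hgs g0 h
        · rw [List.mem_singleton] at h; subst h
          exact ⟨hc, hcur⟩
    obtain ⟨h0, g0', rfl⟩ := List.exists_cons_of_ne_nil hg0.1
    have hh0 : h0 ≠ pvSep := fun h => hg0.2 (by simp [h])
    obtain ⟨s, hcore⟩ := pvJoin_head (h0 :: g0') grest
    have hcoreG : pvJoinCore (pvGroups gs cur) = h0 :: (g0' ++ s) := by
      rw [hG, hcore]; simp
    cases t with
    | true =>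
      obtain ⟨hc, hgne⟩ := ht rfl
      subst hc
      have hrepr : pvRepr gs [] true = (h0 :: (g0' ++ s)) ++ [pvSep] := by
        unfold pvRepr; rw [hcoreG]; simp
      have hcond1 : PySem.List.pyGetD ((h0 :: (g0' ++ s)) ++ [pvSep]) 0 "" = h0 := by
        simp [PySem.List.pyGetD_zero_cons]
      have hcond2 : PySem.List.pyGetD ((h0 :: (g0' ++ s)) ++ [pvSep]) (-1) "" = pvSep :=
        PySem.List.pyGetD_neg_one_append_singleton _ _ _
      simp only []
      rw [hrepr, hcond1, if_neg hh0, hcond2, if_pos rfl]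
      have hdrop : ((h0 :: (g0' ++ s)) ++ [pvSep]).dropLast = h0 :: (g0' ++ s) := by
        rw [List.dropLast_concat]
      rw [hdrop, hcoreG]
    | false =>
      have hc2 : cur ≠ [] := by
        intro hc
        have hgne : gs ≠ [] := by
          intro h
          exact hgrp (by simp [pvGroups, hc, h])
        exact absurd (ht' hc hgne) (by simp)
      obtain ⟨c', lc, hcc⟩ := (List.eq_nil_or_concat cur).resolve_left hc2
      rw [List.concat_eq_append] at hcc; subst hcc
      have hlcne : lc ≠ pvSep := fun h => hcur (by simp [h])
      have hcform : pvJoinCore (pvGroups gs (c' ++ [lc])) = pvJoinCore (gs ++ [c']) ++ [lc] := by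
        unfold pvGroups
        rw [if_pos hc2]
        exact (pvJoin_snoc gs c' lc).symm
      have hrepr : pvRepr gs (c' ++ [lc]) false = pvJoinCore (pvGroups gs (c' ++ [lc])) := by
        simp [pvRepr]
      have hcond1 : PySem.List.pyGetD (pvJoinCore (pvGroups gs (c' ++ [lc]))) 0 "" = h0 := by
        rw [hcoreG]; simp [PySem.List.pyGetD_zero_cons]
      have hcond2 : PySem.List.pyGetD (pvJoinCore (pvGroups gs (c' ++ [lc]))) (-1) "" = lc := by
        rw [hcform]; exact PySem.List.pyGetD_neg_one_append_singleton _ _ _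
      simp only []
      rw [hrepr, hcond1, if_neg hh0, hcond2, if_neg hlcne]

-- the two ports agree on every input (on all-separator menus both return len(menu) separators)
lemma pv_ports_eq (menu : List String) : simplify_menu menu = simplify_menu_alt menu := by
  obtain ⟨t, hinv, heq⟩ := pvFold_sim menu [] [] false
    ⟨by simp, by simp, by simp, by simp⟩
  have h0 : pvRepr ([] : List (List String)) [] false = [] := by
    simp [pvRepr, pvGroups, pvJoinCore]
  rw [h0] at heq
  exact pvFinal menu (menu.foldl pvStepB ([], [])).1 (menu.foldl pvStepB ([], [])).2 t hinv
    (by simp) heq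

-- ===== VERDICT (by name: the statement is the Claim_ definition above) =====
theorem simplify_menu_spec : Claim_equal_simplify_menu := by
  intro menu _ _
  unfold Spec_simplify_menu
  exact pv_ports_eq menu
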